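-- pv_equiv track=rewrite | github.com/apautomationai/sledge-invoice-extractor | invoice_extraction/core/processor.py | group_pages_into_invoices
-- ===== SOURCE A (Python) =====
-- from typing import List, Dict, Optional, Tuple, Any
--
-- def group_pages_into_invoices(analyses: List[Dict]) -> List[List[int]]:
--     """
--     Group page numbers into invoice groups based on AI analysis.
--
--     Args:
--         analyses: List of analysis results for each page
--
--     Returns:
--         List of invoice groups, where each group is a list of page numbers (0-indexed)
--     """
--     if not analyses:
--         return []
--
--     invoice_groups = []
--     current_group = [0]  # Start with first page
--
--     for i in range(1, len(analyses)):
--         analysis = analyses[i]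
--
--         # If this page starts a new invoice, close current group and start new one
--         if analysis.get("is_invoice_start", False):
--             invoice_groups.append(current_group)
--             current_group = [i]
--         # If it's a continuation or uncertain, add to current group
--         else:
--             current_group.append(i)
--
--     # Don't forget the last group
--     if current_group:
--         invoice_groups.append(current_group)
--
--     return invoice_groups
-- ===== SOURCE B (Python) =====
-- def group_pages_into_invoices(analyses):
--     """Group pages into invoice groups by first finding the boundary indices,
--     then materialising each group as a consecutive range between boundaries."""
--     if not analyses:
--         return []
--     n = len(analyses)
--     starts = [0] + [i for i in range(1, n) if analyses[i].get("is_invoice_start", False)]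
--     ends = starts[1:] + [n]
--     return [list(range(s, e)) for s, e in zip(starts, ends)]
-- ===== Notes on version B (the rewrite author's own statement) =====
-- stated objective: alternative
-- what changed: Instead of accumulating one current group mutably page by page, B first computes the list of boundary indices (0 plus every flagged page after it) and then builds each group as the consecutive range between adjacent boundaries.
import Mathlib
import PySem

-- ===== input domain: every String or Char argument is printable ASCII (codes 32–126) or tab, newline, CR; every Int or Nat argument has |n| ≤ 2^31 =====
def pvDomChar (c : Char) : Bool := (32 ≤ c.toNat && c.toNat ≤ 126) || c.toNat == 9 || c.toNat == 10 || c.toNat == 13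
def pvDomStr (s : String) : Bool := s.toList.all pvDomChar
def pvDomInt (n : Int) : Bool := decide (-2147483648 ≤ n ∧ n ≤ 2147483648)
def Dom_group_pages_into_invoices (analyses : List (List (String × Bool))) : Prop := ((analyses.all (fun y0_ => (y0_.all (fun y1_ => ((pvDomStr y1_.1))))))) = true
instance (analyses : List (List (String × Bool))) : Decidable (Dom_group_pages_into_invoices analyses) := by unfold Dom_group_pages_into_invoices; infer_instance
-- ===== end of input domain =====

-- B finds the invoice-start boundary indices first and then builds each group as the
-- consecutive range between adjacent boundaries, instead of A's one-group-at-a-time accumulator.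

-- ===== PORT A =====
def group_pages_into_invoices (analyses : List (List (String × Bool))) : List (List Int) :=
  if analyses.isEmpty then [] else
    let st := (PySem.List.pyRange 1 (analyses.length : Int) 1).foldl
      (fun (st : List (List Int) × List Int) (i : Int) =>
        let analysis := PySem.List.pyGetD analyses i ([] : List (String × Bool))
        -- analysis.get("is_invoice_start", False): first-match association-list lookup
        if (analysis.lookup "is_invoice_start").getD false then
          (st.1 ++ [st.2], [i])
        else
          (st.1, st.2 ++ [i]))
      ([], [(0 : Int)])
    if st.2.isEmpty then st.1 else st.1 ++ [st.2]

-- ===== PORT B =====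
def group_pages_into_invoices_alt (analyses : List (List (String × Bool))) : List (List Int) :=
  if analyses.isEmpty then [] else
    let n : Int := analyses.length
    let starts : List Int := 0 :: (PySem.List.pyRange 1 n 1).filter
        (fun i => ((PySem.List.pyGetD analyses i ([] : List (String × Bool))).lookup
                    "is_invoice_start").getD false)
    let ends : List Int := starts.drop 1 ++ [n]
    (starts.zip ends).map (fun p => PySem.List.pyRange p.1 p.2 1)

-- ===== PRECONDITION & SPEC =====
def Spec_group_pages_into_invoices (analyses : List (List (String × Bool))) (out : List (List Int)) : Prop := out = group_pages_into_invoices_alt analyses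
instance (analyses : List (List (String × Bool))) (out : List (List Int)) : Decidable (Spec_group_pages_into_invoices analyses out) := by unfold Spec_group_pages_into_invoices; infer_instance

-- ===== CLAIM (what is proved, stated in full; the proofs are below) =====
def Claim_equal_group_pages_into_invoices : Prop := ∀ (analyses : List (List (String × Bool))), Dom_group_pages_into_invoices analyses → Spec_group_pages_into_invoices analyses (group_pages_into_invoices analyses)

-- ===== LEMMAS AND PROOFS =====

-- the flag of one page
def pvFlag (d : List (String × Bool)) : Bool := (d.lookup "is_invoice_start").getD false

-- reference splitting of the pages `rest` (occupying indices s, s+1, …) into ranges,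
-- the current group having started at c
def pvSplit (c s : Int) (rest : List (List (String × Bool))) : List (List Int) :=
  match rest with
  | [] => [PySem.List.pyRange c s 1]
  | d :: rest' =>
      if pvFlag d then PySem.List.pyRange c s 1 :: pvSplit s (s + 1) rest'
      else pvSplit c (s + 1) rest'

def pvStepF (st : List (List Int) × List Int) (p : Int × List (String × Bool)) :
    List (List Int) × List Int :=
  if pvFlag p.2 then (st.1 ++ [st.2], [p.1]) else (st.1, st.2 ++ [p.1])

def pvFinish (st : List (List Int) × List Int) : List (List Int) :=
  if st.2.isEmpty then st.1 else st.1 ++ [st.2]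

lemma pyRange_one_nonempty {c s : Int} (h : c < s) :
    (PySem.List.pyRange c s 1).isEmpty = false := by
  rw [List.isEmpty_eq_false_iff, ← List.length_pos_iff, PySem.List.length_pyRange_one]
  omega

lemma lemA (rest : List (List (String × Bool))) :
    ∀ (gs : List (List Int)) (c s : Int), c < s →
    pvFinish ((PySem.List.enumerate rest s).foldl pvStepF (gs, PySem.List.pyRange c s 1))
      = gs ++ pvSplit c s rest := by
  induction rest with
  | nil =>
      intro gs c s h
      rw [PySem.List.enumerate_nil, List.foldl_nil, pvSplit, pvFinish,
        pyRange_one_nonempty h]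
      rfl
  | cons d rest ih =>
      intro gs c s h
      rw [PySem.List.enumerate_cons, List.foldl_cons]
      by_cases hf : pvFlag d
      · have hstep : pvStepF (gs, PySem.List.pyRange c s 1) (s, d)
            = (gs ++ [PySem.List.pyRange c s 1], PySem.List.pyRange s (s + 1) 1) := by
          simp only [pvStepF, hf, if_true, PySem.List.pyRange_one_singleton]
        rw [hstep, ih _ s (s + 1) (by omega)]
        simp [pvSplit, hf]
      · have hstep : pvStepF (gs, PySem.List.pyRange c s 1) (s, d)
            = (gs, PySem.List.pyRange c (s + 1) 1) := by
          simp only [pvStepF, hf, if_false, Bool.false_eq_true,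
            PySem.List.pyRange_one_succ_right (by omega : c ≤ s)]
        rw [hstep, ih gs c (s + 1) (by omega)]
        simp [pvSplit, hf]

-- B-side boundary list over enumerated pages
def pvBStarts (s : Int) (rest : List (List (String × Bool))) : List Int :=
  (PySem.List.enumerate rest s).filterMap (fun p => if pvFlag p.2 then some p.1 else none)

lemma lemB (rest : List (List (String × Bool))) :
    ∀ (c s n : Int), c < s → n = s + rest.length →
    ((c :: pvBStarts s rest).zip (pvBStarts s rest ++ [n])).map
      (fun p => PySem.List.pyRange p.1 p.2 1) = pvSplit c s rest := by
  induction rest with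
  | nil =>
      intro c s n h hn
      rw [List.length_nil] at hn
      have : n = s := by omega
      subst this
      rw [pvBStarts, PySem.List.enumerate_nil, List.filterMap_nil, pvSplit]
      rfl
  | cons d rest ih =>
      intro c s n h hn
      rw [List.length_cons] at hn
      have hb : pvBStarts s (d :: rest)
          = if pvFlag d then s :: pvBStarts (s + 1) rest else pvBStarts (s + 1) rest := by
        rw [pvBStarts, PySem.List.enumerate_cons, List.filterMap_cons]
        by_cases hf : pvFlag d <;> simp [hf, pvBStarts]
      by_cases hf : pvFlag d
      · rw [hb]; simp only [hf, if_true]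
        have hred : ((c :: s :: pvBStarts (s + 1) rest).zip
              ((s :: pvBStarts (s + 1) rest) ++ [n])).map
              (fun p => PySem.List.pyRange p.1 p.2 1)
            = PySem.List.pyRange c s 1 ::
              ((s :: pvBStarts (s + 1) rest).zip (pvBStarts (s + 1) rest ++ [n])).map
                (fun p => PySem.List.pyRange p.1 p.2 1) := rfl
        rw [hred, ih s (s + 1) n (by omega) (by push_cast at hn; omega)]
        simp [pvSplit, hf]
      · rw [hb]; simp only [hf, if_false, Bool.false_eq_true]
        rw [ih c (s + 1) n (by omega) (by push_cast at hn; omega)]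
        simp [pvSplit, hf]

lemma pv_filter_eq_filterMap {α : Type} (l : List α) (p : α → Bool) :
    l.filter p = l.filterMap (fun x => if p x then some x else none) := by
  induction l with
  | nil => rfl
  | cons a l ih => simp only [List.filter_cons, List.filterMap_cons]; split <;> simp [ih]

lemma bridge (a : List (String × Bool)) (rest : List (List (String × Bool))) :
    (PySem.List.pyRange 1 ((a :: rest).length : Int) 1).map
      (fun j => (j, PySem.List.pyGetD (a :: rest) j ([] : List (String × Bool))))
    = PySem.List.enumerate rest 1 := by
  have h := PySem.List.enumerate_eq_map_pyRange (xs := a :: rest)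
    (d := ([] : List (String × Bool)))
  rw [PySem.List.pyRange_one_cons (by simp)] at h
  rw [PySem.List.enumerate_cons, List.map_cons] at h
  exact (List.tail_eq_of_cons_eq h).symm

-- ===== VERDICT (by name: the statement is the Claim_ definition above) =====
theorem group_pages_into_invoices_spec : Claim_equal_group_pages_into_invoices := by
  intro analyses _dom
  unfold Spec_group_pages_into_invoices
  cases analyses with
  | nil => rfl
  | cons a rest =>
      have hfoldA :
          (PySem.List.pyRange 1 ((a :: rest).length : Int) 1).foldl
            (fun (st : List (List Int) × List Int) (i : Int) =>
              let analysis := PySem.List.pyGetD (a :: rest) i ([] : List (String × Bool))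
              if (analysis.lookup "is_invoice_start").getD false then
                (st.1 ++ [st.2], [i])
              else (st.1, st.2 ++ [i]))
            ([], [(0 : Int)])
          = (PySem.List.enumerate rest 1).foldl pvStepF ([], PySem.List.pyRange 0 1 1) := by
        have h01 : PySem.List.pyRange 0 1 1 = [(0 : Int)] := by decide
        rw [← bridge a rest, List.foldl_map, h01]
        rfl
      have hA : group_pages_into_invoices (a :: rest) = [] ++ pvSplit 0 1 rest := by
        rw [show group_pages_into_invoices (a :: rest)
            = pvFinish ((PySem.List.pyRange 1 ((a :: rest).length : Int) 1).foldl
                (fun (st : List (List Int) × List Int) (i : Int) =>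
                  let analysis := PySem.List.pyGetD (a :: rest) i ([] : List (String × Bool))
                  if (analysis.lookup "is_invoice_start").getD false then
                    (st.1 ++ [st.2], [i])
                  else (st.1, st.2 ++ [i]))
                ([], [(0 : Int)])) from rfl,
          hfoldA]
        exact lemA rest [] 0 1 (by omega)
      have hfiltB :
          (PySem.List.pyRange 1 (((a :: rest).length : Int)) 1).filter
            (fun i => ((PySem.List.pyGetD (a :: rest) i
                ([] : List (String × Bool))).lookup "is_invoice_start").getD false)
          = pvBStarts 1 rest := by
        rw [pvBStarts, ← bridge a rest, List.filterMap_map, pv_filter_eq_filterMap]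
        rfl
      have hB : group_pages_into_invoices_alt (a :: rest) = pvSplit 0 1 rest := by
        rw [show group_pages_into_invoices_alt (a :: rest)
            = ((((0 : Int) :: (PySem.List.pyRange 1 (((a :: rest).length : Int)) 1).filter
                  (fun i => ((PySem.List.pyGetD (a :: rest) i
                    ([] : List (String × Bool))).lookup "is_invoice_start").getD false)).zip
                ((PySem.List.pyRange 1 (((a :: rest).length : Int)) 1).filter
                  (fun i => ((PySem.List.pyGetD (a :: rest) i
                    ([] : List (String × Bool))).lookup "is_invoice_start").getD false)
                  ++ [((a :: rest).length : Int)])).map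
                (fun p => PySem.List.pyRange p.1 p.2 1)) from rfl,
          hfiltB]
        exact lemB rest 0 1 ((a :: rest).length : Int) (by omega)
          (by rw [List.length_cons]; push_cast; ring)
      rw [hA, hB, List.nil_append]
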